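-- pv_equiv track=rewrite | github.com/pji-min/Algorithm | 프로그래머스/0/120956. 옹알이 （1）/옹알이 （1）.py | solution
-- ===== SOURCE A (Python) =====
-- def solution(babbling):
--     valid_sounds = ["aya", "ye", "woo", "ma"]
--     count = 0
--
--     def can_pronounce(word, used):
--         if not word:
--             return True
--         for sound in valid_sounds:
--             if sound in used:
--                 continue
--             if word.startswith(sound):
--                 if can_pronounce(word[len(sound):], used + [sound]):
--                     return True
--         return False
--
--     for word in babbling:
--         if can_pronounce(word, []):
--             count += 1
--
--     return count
-- ===== SOURCE B (Python) =====
-- def solution(babbling):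
--     sounds = ["aya", "ye", "woo", "ma"]
--     table = set()
--
--     def build(prefix, remaining):
--         table.add(prefix)
--         for i, s in enumerate(remaining):
--             build(prefix + s, remaining[:i] + remaining[i + 1:])
--
--     build("", sounds)
--     return sum(1 for word in babbling if word in table)
-- ===== Notes on version B (the rewrite author's own statement) =====
-- stated objective: faster
-- what changed: B precomputes the full 65-element set of pronounceable strings (all joins of permutations of subsets of the 4 sounds) once, then counts words by set membership, replacing A's per-word recursive backtracking segmentation.
import Mathlib
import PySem

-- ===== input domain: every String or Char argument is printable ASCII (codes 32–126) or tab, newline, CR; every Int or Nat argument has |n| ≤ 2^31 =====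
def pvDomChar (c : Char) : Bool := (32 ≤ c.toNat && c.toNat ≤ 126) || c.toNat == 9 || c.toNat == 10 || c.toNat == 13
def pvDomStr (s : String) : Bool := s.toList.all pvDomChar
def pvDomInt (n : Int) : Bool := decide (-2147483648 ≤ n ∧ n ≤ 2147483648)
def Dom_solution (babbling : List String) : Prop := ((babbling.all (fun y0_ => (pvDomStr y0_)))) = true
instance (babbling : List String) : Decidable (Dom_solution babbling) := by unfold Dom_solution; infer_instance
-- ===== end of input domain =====

-- B precomputes the full set of pronounceable strings once (joins of permutations of subsets
-- of the 4 sounds) and counts words by set membership, instead of A's per-word backtracking.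

-- ===== PORT A =====
def pvSounds : List (List Char) := [['a','y','a'], ['y','e'], ['w','o','o'], ['m','a']]

def canPronounce (word : List Char) (used : List (List Char)) : Bool :=
  if h0 : word = [] then true
  else
    pvSounds.attach.any (fun s =>
      if used.contains s.1 then false
      else if PySem.Chars.startswith word s.1 then
        canPronounce (word.drop s.1.length) (used ++ [s.1])
      else false)
termination_by word.length
decreasing_by
  have h1 : 0 < word.length := List.length_pos_of_ne_nil h0
  have hm := s.2
  have h2 : 0 < s.1.length := by
    simp only [pvSounds, List.mem_cons, List.not_mem_nil, or_false] at hm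
    rcases hm with h | h | h | h <;> simp [h]
  simp only [List.length_drop]; omega

def solution (babbling : List String) : Int :=
  babbling.foldl (fun count word => if canPronounce word.toList [] then count + 1 else count) 0

-- ===== PORT B =====
def pvBuild (pre : List Char) (remaining : List (List Char)) (table : PySem.Set (List Char)) :
    PySem.Set (List Char) :=
  (PySem.List.enumerate remaining).attach.foldl
    (fun t p =>
      pvBuild (pre ++ p.1.2)
        (PySem.List.slice remaining none (some p.1.1) ++
         PySem.List.slice remaining (some (p.1.1 + 1)) none)
        t)
    (PySem.Set.add table pre)
termination_by remaining.length
decreasing_by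
  obtain ⟨k, hk, hpk⟩ := (PySem.List.mem_enumerate_iff remaining 0 p.1).mp p.2
  have h1 : p.1.1 = (k : Int) := by rw [hpk]; simp
  rw [h1, PySem.List.slice_to remaining (by positivity),
      PySem.List.slice_from remaining (by positivity)]
  have h2 : ((k : Int) + 1).toNat = k + 1 := by omega
  simp only [List.length_append, List.length_take, List.length_drop, Int.toNat_natCast, h2]
  omega

def pvTable : PySem.Set (List Char) := pvBuild [] pvSounds PySem.Set.empty

def solution_alt (babbling : List String) : Int :=
  babbling.foldl (fun count word =>
    if PySem.Set.contains pvTable word.toList then count + 1 else count) 0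

-- ===== PRECONDITION & SPEC =====
def Spec_solution (babbling : List String) (out : Int) : Prop := out = solution_alt babbling
instance (babbling : List String) (out : Int) : Decidable (Spec_solution babbling out) := by unfold Spec_solution; infer_instance

-- ===== CLAIM (what is proved, stated in full; the proofs are below) =====
def Claim_equal_solution : Prop := ∀ (babbling : List String), Dom_solution babbling → Spec_solution babbling (solution babbling)

-- ===== LEMMAS AND PROOFS =====

/-- `PvForms w rem`: `w` is the concatenation of some sequence of distinct sounds from `rem`. -/
inductive PvForms : List Char → List (List Char) → Prop where
  | nil (rem : List (List Char)) : PvForms [] rem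
  | cons {s t : List Char} {rem : List (List Char)}
      (hmem : s ∈ rem) (h : PvForms t (rem.erase s)) : PvForms (s ++ t) rem

lemma pvSounds_len_pos : ∀ s ∈ pvSounds, 0 < s.length := by decide

lemma pvSounds_nodup : pvSounds.Nodup := by decide

lemma filter_used_append (used : List (List Char)) (s : List Char) :
    pvSounds.filter (fun x => !(used ++ [s]).contains x)
      = (pvSounds.filter (fun x => !used.contains x)).erase s := by
  rw [List.Nodup.erase_eq_filter (List.Nodup.filter _ pvSounds_nodup) s, List.filter_filter]
  apply List.filter_congr
  intro x hx
  cases hu : used.contains x <;> cases hs' : x == s <;>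
    simp_all

lemma canPronounce_iff_aux : ∀ (n : Nat) (word : List Char), word.length ≤ n →
    ∀ (used : List (List Char)),
    (canPronounce word used = true ↔
      PvForms word (pvSounds.filter (fun s => !used.contains s))) := by
  intro n
  induction n with
  | zero =>
    intro word hw used
    have hnil : word = [] := List.eq_nil_of_length_eq_zero (Nat.le_zero.mp hw)
    subst hnil
    exact iff_of_true (by rw [canPronounce]; simp) (PvForms.nil _)
  | succ n ih =>
    intro word hw used
    by_cases hnil : word = []
    · subst hnil
      exact iff_of_true (by rw [canPronounce]; simp) (PvForms.nil _)
    · rw [canPronounce, dif_neg hnil, List.any_eq_true]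
      constructor
      · rintro ⟨⟨s, hs⟩, -, hf⟩
        simp only at hf
        split_ifs at hf with hu hsw
        obtain ⟨t, rfl⟩ := (PySem.Chars.startswith_iff word s).mp hsw
        rw [List.drop_left] at hf
        have hslen : 0 < s.length := pvSounds_len_pos s hs
        have ht : t.length ≤ n := by
          rw [List.length_append] at hw; omega
        have hforms := (ih t ht (used ++ [s])).mp hf
        rw [filter_used_append] at hforms
        exact PvForms.cons (List.mem_filter.mpr ⟨hs, by simpa using hu⟩) hforms
      · intro hforms
        cases hforms with
        | nil => exact absurd rfl hnil
        | cons hmem hrest =>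
          rename_i s t
          have hs : s ∈ pvSounds := (List.mem_filter.mp hmem).1
          have hu : used.contains s = false := by
            have := (List.mem_filter.mp hmem).2
            simpa using this
          refine ⟨⟨s, hs⟩, List.mem_attach _ _, ?_⟩
          simp only
          rw [if_neg (by intro hcon; rw [hu] at hcon; cases hcon),
              if_pos ((PySem.Chars.startswith_iff _ _).mpr ⟨t, rfl⟩),
              List.drop_left]
          have hslen : 0 < s.length := pvSounds_len_pos s hs
          have ht : t.length ≤ n := by
            rw [List.length_append] at hw; omega
          apply (ih t ht (used ++ [s])).mpr
          rw [filter_used_append]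
          exact hrest

lemma canPronounce_main (word : List Char) :
    canPronounce word [] = true ↔ PvForms word pvSounds := by
  have := canPronounce_iff_aux word.length word le_rfl []
  simpa using this

lemma pvForms_nil_right {t : List Char} (h : PvForms t []) : t = [] := by
  cases h with
  | nil => rfl
  | cons hmem _ => exact absurd hmem (List.not_mem_nil)

lemma erase_eq_eraseIdx_nodup :
    ∀ (l : List (List Char)) (k : Nat) (h : k < l.length), l.Nodup →
      l.erase l[k] = l.eraseIdx k := by
  intro l
  induction l with
  | nil => intro k h; simp at h
  | cons a as ih =>
    intro k h hnd
    cases k with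
    | zero => simp
    | succ k =>
      have hk : k < as.length := by simpa using h
      have hne : (a == as[k]) = false := by
        have hnin : a ∉ as := (List.nodup_cons.mp hnd).1
        have hmem : as[k] ∈ as := List.getElem_mem hk
        simp only [beq_eq_false_iff_ne, ne_eq]
        intro he; exact hnin (he ▸ hmem)
      simp only [List.getElem_cons_succ, List.eraseIdx_cons_succ,
        List.erase_cons, hne]
      rw [if_neg (by simp)]
      rw [ih k hk (List.nodup_cons.mp hnd).2]

lemma mem_foldl_iff {β : Type} (F : PySem.Set (List Char) → β → PySem.Set (List Char))
    (Q : β → List Char → Prop) :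
    ∀ (l : List β),
      (∀ tb b x, b ∈ l → (x ∈ F tb b ↔ x ∈ tb ∨ Q b x)) →
      ∀ (tb : PySem.Set (List Char)) (x : List Char),
        x ∈ l.foldl F tb ↔ x ∈ tb ∨ ∃ b ∈ l, Q b x := by
  intro l
  induction l with
  | nil => intro _ tb x; simp
  | cons b bs ih =>
    intro hF tb x
    rw [List.foldl_cons,
        ih (fun tb' b' x' hb' => hF tb' b' x' (List.mem_cons_of_mem _ hb')) (F tb b) x,
        hF tb b x List.mem_cons_self, List.exists_mem_cons_iff]
    tauto

lemma mem_pvBuild : ∀ (n : Nat) (rem : List (List Char)), rem.length ≤ n → rem.Nodup →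
    ∀ (pre : List Char) (tbl : PySem.Set (List Char)) (x : List Char),
    (x ∈ pvBuild pre rem tbl ↔ x ∈ tbl ∨ ∃ t, PvForms t rem ∧ x = pre ++ t) := by
  intro n
  induction n with
  | zero =>
    intro rem hlen _ pre tbl x
    have hnil : rem = [] := List.eq_nil_of_length_eq_zero (Nat.le_zero.mp hlen)
    subst hnil
    rw [pvBuild]
    simp only [PySem.List.enumerate_nil, List.attach_nil, List.foldl_nil,
      PySem.Set.mem_add]
    constructor
    · rintro (h | rfl)
      · exact Or.inl h
      · exact Or.inr ⟨[], PvForms.nil _, (List.append_nil _).symm⟩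
    · rintro (h | ⟨t, hforms, rfl⟩)
      · exact Or.inl h
      · rw [pvForms_nil_right hforms]; simp
  | succ n ih =>
    intro rem hlen hnd pre tbl x
    rw [pvBuild]
    rw [mem_foldl_iff _
      (fun b y => ∃ t, PvForms t (rem.eraseIdx b.1.1.toNat) ∧ y = pre ++ b.1.2 ++ t)
      _ ?_ _ x]
    · rw [PySem.Set.mem_add]
      constructor
      · rintro ((h | rfl) | ⟨⟨⟨i, s⟩, hm⟩, -, t, hforms, rfl⟩)
        · exact Or.inl h
        · exact Or.inr ⟨[], PvForms.nil _, (List.append_nil _).symm⟩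
        · obtain ⟨k, hk, hpk⟩ := (PySem.List.mem_enumerate_iff rem 0 (i, s)).mp hm
          have hi : i = (k : Int) := by
            have := congrArg Prod.fst hpk; simpa using this
          have hsk : s = rem[k] := by
            have := congrArg Prod.snd hpk; simpa using this
          subst hi; subst hsk
          refine Or.inr ⟨rem[k] ++ t, ?_, by rw [List.append_assoc]⟩
          refine PvForms.cons (List.getElem_mem hk) ?_
          rw [erase_eq_eraseIdx_nodup rem k hk hnd]
          simpa using hforms
      · rintro (h | ⟨t, hforms, rfl⟩)
        · exact Or.inl (Or.inl h)
        · cases hforms with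
          | nil => exact Or.inl (Or.inr (List.append_nil pre))
          | cons hmem hrest =>
            rename_i s t'
            obtain ⟨k, hk, hsk⟩ := List.getElem_of_mem hmem
            refine Or.inr ⟨⟨((k : Int), s), ?_⟩, List.mem_attach _ _, t', ?_, ?_⟩
            · exact (PySem.List.mem_enumerate_iff rem 0 ((k : Int), s)).mpr
                ⟨k, hk, by simp [hsk]⟩
            · have : rem.erase s = rem.eraseIdx k := by
                rw [← hsk] at *
                exact erase_eq_eraseIdx_nodup rem k hk hnd
              rw [this] at hrest
              simpa using hrest
            · rw [List.append_assoc]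
    · -- the hypothesis of mem_foldl_iff
      rintro tb ⟨⟨i, s⟩, hm⟩ y -
      obtain ⟨k, hk, hpk⟩ := (PySem.List.mem_enumerate_iff rem 0 (i, s)).mp hm
      have hi : i = (k : Int) := by
        have := congrArg Prod.fst hpk; simpa using this
      subst hi
      simp only
      rw [PySem.List.slice_to rem (by positivity),
          PySem.List.slice_from rem (by positivity)]
      have h2 : ((k : Int) + 1).toNat = k + 1 := by omega
      rw [h2, Int.toNat_natCast, ← List.eraseIdx_eq_take_drop_succ]
      have hlen' : (rem.eraseIdx k).length ≤ n := by
        rw [List.length_eraseIdx]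
        simp only [hk, if_true]
        omega
      have hnd' : (rem.eraseIdx k).Nodup := (List.eraseIdx_sublist rem k).nodup hnd
      simpa using ih (rem.eraseIdx k) hlen' hnd' (pre ++ s) tb y

lemma mem_pvTable (x : List Char) : x ∈ pvTable ↔ PvForms x pvSounds := by
  unfold pvTable
  rw [mem_pvBuild pvSounds.length pvSounds le_rfl pvSounds_nodup [] PySem.Set.empty x]
  simp [PySem.Set.empty]

-- ===== VERDICT (by name: the statement is the Claim_ definition above) =====
theorem solution_spec : Claim_equal_solution := by
  intro babbling _
  unfold Spec_solution solution solution_alt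
  apply PySem.List.foldl_congr_mem
  intro acc w hw
  have hb : canPronounce w.toList [] = PySem.Set.contains pvTable w.toList := by
    rw [Bool.eq_iff_iff, canPronounce_main, PySem.Set.contains_iff, mem_pvTable]
  rw [hb]
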